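-- pv_equiv track=rewrite | github.com/prozoroff/bitgn-challenge | agent/security.py | _account_id_for_company_heading
-- ===== SOURCE A (Python) =====
-- import unicodedata
--
-- def _alnum_fold(s: str) -> str:
--     """Lowercase alnum-only fingerprint for loose company / heading matching."""
--     return "".join(ch for ch in unicodedata.normalize("NFKC", s).casefold() if ch.isalnum())
--
-- def _account_id_for_company_heading(
--     title: str,
--     accounts_by_id: dict[str, tuple[str | None, str | None]],
-- ) -> str | None:
--     """Map a markdown `# Company` title to a read ``accounts/acct_*.json`` id."""
--     if not title or not accounts_by_id:
--         return None
--     t = _alnum_fold(title)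
--     if len(t) < 4:
--         return None
--     best_aid: str | None = None
--     best_len = 0
--     for aid, (aname, alegal) in accounts_by_id.items():
--         for label in (aname, alegal):
--             if not label:
--                 continue
--             l = _alnum_fold(label)
--             if not l:
--                 continue
--             if t == l:
--                 return aid
--             if len(t) >= 6 and (t in l or l in t):
--                 ln = min(len(t), len(l))
--                 if ln > best_len:
--                     best_len = ln
--                     best_aid = aid
--     return best_aid
-- ===== SOURCE B (Python) =====
-- import unicodedata
--
-- def _alnum_fold(s: str) -> str:
--     return "".join(ch for ch in unicodedata.normalize("NFKC", s).casefold() if ch.isalnum())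
--
-- def _account_id_for_company_heading(
--     title: str,
--     accounts_by_id: dict[str, tuple[str | None, str | None]],
-- ) -> str | None:
--     if not title or not accounts_by_id:
--         return None
--     t = _alnum_fold(title)
--     if len(t) < 4:
--         return None
--     # Precompute folded labels once: ordered (aid, folded) pairs + first-wins exact index.
--     pairs: list[tuple[str, str]] = []
--     exact: dict[str, str] = {}
--     for aid, (aname, alegal) in accounts_by_id.items():
--         for label in (aname, alegal):
--             if label:
--                 l = _alnum_fold(label)
--                 if l:
--                     pairs.append((aid, l))
--                     exact.setdefault(l, aid)
--     if t in exact: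
--         return exact[t]
--     if len(t) < 6:
--         return None
--     best_aid: str | None = None
--     best_len = 0
--     for aid, l in pairs:
--         if t in l or l in t:
--             ln = min(len(t), len(l))
--             if ln > best_len:
--                 best_len = ln
--                 best_aid = aid
--     return best_aid
-- ===== Notes on version B (the rewrite author's own statement) =====
-- stated objective: idiomatic
-- what changed: B precomputes all folded labels in one pass into an ordered (aid, folded) list plus a first-wins exact-match dict, then resolves an exact match by a single hash lookup and only on a miss runs a separate substring pass, instead of A's single interleaved loop that folds labels and checks exact and substring matches together with an early return.
import Mathlib
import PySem

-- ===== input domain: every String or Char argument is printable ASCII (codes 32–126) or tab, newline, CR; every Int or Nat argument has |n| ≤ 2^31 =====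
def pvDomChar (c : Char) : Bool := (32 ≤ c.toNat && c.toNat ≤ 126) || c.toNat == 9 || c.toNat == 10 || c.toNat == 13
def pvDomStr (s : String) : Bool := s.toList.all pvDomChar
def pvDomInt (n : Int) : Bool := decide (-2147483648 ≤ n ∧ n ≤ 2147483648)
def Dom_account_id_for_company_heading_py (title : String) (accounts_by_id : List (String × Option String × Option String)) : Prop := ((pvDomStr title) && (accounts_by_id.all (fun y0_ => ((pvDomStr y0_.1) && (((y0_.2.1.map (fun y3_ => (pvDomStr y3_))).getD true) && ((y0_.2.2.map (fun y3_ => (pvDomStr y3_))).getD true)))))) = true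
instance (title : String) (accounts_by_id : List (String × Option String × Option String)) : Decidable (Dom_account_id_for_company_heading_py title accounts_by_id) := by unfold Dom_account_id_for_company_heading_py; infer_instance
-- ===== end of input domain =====

-- B replaces A's single interleaved scan (fold + exact check + substring check with early return)
-- by a precomputed folded-label list and a first-wins exact-match dict queried once; objective: idiomatic.

-- ===== PORT A =====
-- _alnum_fold: on the ASCII domain NFKC is the identity and casefold = lower, so the fold is
-- lowercase then keep alphanumeric characters (exact on Dom's printable-ASCII strings).
def alnumFold (s : String) : List Char :=
  (PySem.Chars.lower s.toList).filter PySem.Chars.isalnum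

-- inner `for label in (aname, alegal)` loop; .inl aid = the early `return aid`,
-- .inr best = fall through with the updated (best_aid, best_len) state
def aInner (t : List Char) (aid : String) (labels : List (Option String))
    (best : Option String × Nat) : Sum String (Option String × Nat) :=
  match labels with
  | [] => .inr best
  | label :: rest =>
    match label with
    | none => aInner t aid rest best
    | some lab =>
      if lab = "" then aInner t aid rest best
      else
        let l := alnumFold lab
        if l = [] then aInner t aid rest best
        else if t = l then .inl aid
        else if 6 ≤ t.length ∧ (PySem.Chars.isIn t l ∨ PySem.Chars.isIn l t) then
          let ln := min t.length l.length
          if best.2 < ln then aInner t aid rest (some aid, ln)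
          else aInner t aid rest best
        else aInner t aid rest best

-- outer `for aid, (aname, alegal) in accounts_by_id.items()` loop
def aLoop (t : List Char) (xs : List (String × Option String × Option String))
    (best : Option String × Nat) : Option String :=
  match xs with
  | [] => best.1
  | (aid, aname, alegal) :: rest =>
    match aInner t aid [aname, alegal] best with
    | .inl r => some r
    | .inr best' => aLoop t rest best'

def account_id_for_company_heading_py (title : String) (accounts_by_id : List (String × Option String × Option String)) : Option String :=
  if title = "" ∨ accounts_by_id = [] then none
  else
    let t := alnumFold title
    if t.length < 4 then none
    else aLoop t accounts_by_id (none, 0)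

-- ===== PORT B =====
-- one build pass: ordered (aid, folded) pairs plus a first-wins exact dict (setdefault)
def bAddLabel (aid : String) (label : Option String)
    (acc : List (String × List Char) × PySem.Dict (List Char) String) :
    List (String × List Char) × PySem.Dict (List Char) String :=
  match label with
  | none => acc
  | some lab =>
    if lab = "" then acc
    else
      let l := alnumFold lab
      if l = [] then acc
      else (acc.1 ++ [(aid, l)], PySem.Dict.setdefault acc.2 l aid)

def bBuild (xs : List (String × Option String × Option String)) :
    List (String × List Char) × PySem.Dict (List Char) String :=
  xs.foldl (fun acc e => bAddLabel e.1 e.2.2 (bAddLabel e.1 e.2.1 acc)) ([], PySem.Dict.empty)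

def account_id_for_company_heading_py_alt (title : String) (accounts_by_id : List (String × Option String × Option String)) : Option String :=
  if title = "" ∨ accounts_by_id = [] then none
  else
    let t := alnumFold title
    if t.length < 4 then none
    else
      let built := bBuild accounts_by_id
      match built.2.get? t with
      | some aid => some aid
      | none =>
        if t.length < 6 then none
        else
          (built.1.foldl (fun best p =>
            if PySem.Chars.isIn t p.2 ∨ PySem.Chars.isIn p.2 t then
              let ln := min t.length p.2.length
              if best.2 < ln then (some p.1, ln) else best
            else best) ((none : Option String), 0)).1

-- ===== PRECONDITION & SPEC =====
-- Pre_ excludes association lists with duplicate account ids: such a list does not correspond to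
-- any Python dict (dict keys are unique), so A's behaviour on it is not defined by the source.
def Pre_account_id_for_company_heading_py (title : String) (accounts_by_id : List (String × Option String × Option String)) : Prop :=
  (accounts_by_id.map Prod.fst).Nodup
instance (title : String) (accounts_by_id : List (String × Option String × Option String)) : Decidable (Pre_account_id_for_company_heading_py title accounts_by_id) := by unfold Pre_account_id_for_company_heading_py; infer_instance

def pvWitness_account_id_for_company_heading_py : String × (List (String × Option String × Option String)) :=
  ("Acme Corp", [("acct_1", some "Acme Corporation", none), ("acct_2", some "Globex", some "Globex LLC")])

def Spec_account_id_for_company_heading_py (title : String) (accounts_by_id : List (String × Option String × Option String)) (out : Option String) : Prop := out = account_id_for_company_heading_py_alt title accounts_by_id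
instance (title : String) (accounts_by_id : List (String × Option String × Option String)) (out : Option String) : Decidable (Spec_account_id_for_company_heading_py title accounts_by_id out) := by unfold Spec_account_id_for_company_heading_py; infer_instance

-- ===== CLAIM (what is proved, stated in full; the proofs are below) =====
def Claim_equal_account_id_for_company_heading_py : Prop := ∀ (title : String) (accounts_by_id : List (String × Option String × Option String)), Dom_account_id_for_company_heading_py title accounts_by_id → Pre_account_id_for_company_heading_py title accounts_by_id → Spec_account_id_for_company_heading_py title accounts_by_id (account_id_for_company_heading_py title accounts_by_id)

-- ===== LEMMAS AND PROOFS =====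

-- the (aid, folded) pairs contributed by one optional label
def labelPair (aid : String) (label : Option String) : List (String × List Char) :=
  match label with
  | none => []
  | some lab => if lab = "" then [] else if alnumFold lab = [] then [] else [(aid, alnumFold lab)]

-- all (aid, folded) pairs of the account list, in A's traversal order
def pairsOf (xs : List (String × Option String × Option String)) : List (String × List Char) :=
  xs.flatMap (fun e => labelPair e.1 e.2.1 ++ labelPair e.1 e.2.2)

-- A's substring-scan step (with the len(t) >= 6 gate inside, as in A)
def aStep (t : List Char) (best : Option String × Nat) (p : String × List Char) : Option String × Nat :=
  if 6 ≤ t.length ∧ (PySem.Chars.isIn t p.2 ∨ PySem.Chars.isIn p.2 t) then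
    if best.2 < min t.length p.2.length then (some p.1, min t.length p.2.length) else best
  else best

-- invariant of B's build pass: the exact dict is first-match lookup in the pairs list
def InvD (acc : List (String × List Char) × PySem.Dict (List Char) String) : Prop :=
  ∀ k, acc.2.get? k = ((acc.1.find? (fun p => p.2 == k)).map Prod.fst)

theorem labelPair_fst (aid : String) (label : Option String) (p : String × List Char)
    (h : p ∈ labelPair aid label) : p.1 = aid := by
  cases label with
  | none => simp [labelPair] at h
  | some lab =>
    simp only [labelPair] at h
    split_ifs at h <;> simp_all

theorem bAddLabel_fst (aid : String) (label : Option String) (acc) :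
    (bAddLabel aid label acc).1 = acc.1 ++ labelPair aid label := by
  cases label with
  | none => simp [bAddLabel, labelPair]
  | some lab =>
    simp only [bAddLabel, labelPair]
    split_ifs <;> simp

theorem bAddLabel_inv (aid : String) (label : Option String) (acc)
    (h : InvD acc) : InvD (bAddLabel aid label acc) := by
  intro k
  rw [bAddLabel_fst]
  cases label with
  | none => simpa [labelPair] using h k
  | some lab =>
    simp only [bAddLabel, labelPair]
    split_ifs with h1 h2
    · simpa using h k
    · simpa using h k
    · by_cases hk : alnumFold lab = k
      · subst hk
        rw [PySem.Dict.get?_setdefault_self, h (alnumFold lab), List.find?_append]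
        cases hf : acc.1.find? (fun p => p.2 == alnumFold lab) <;> simp [List.find?]
      · have hb : (alnumFold lab == k) = false := by simp [hk]
        rw [PySem.Dict.get?_setdefault_of_ne _ _ (fun e => hk e.symm), h k, List.find?_append]
        cases hf : acc.1.find? (fun p => p.2 == k) <;> simp [List.find?, hb]

theorem bBuild_aux (xs : List (String × Option String × Option String)) (acc) (h : InvD acc) :
    (xs.foldl (fun acc e => bAddLabel e.1 e.2.2 (bAddLabel e.1 e.2.1 acc)) acc).1
      = acc.1 ++ pairsOf xs ∧
    InvD (xs.foldl (fun acc e => bAddLabel e.1 e.2.2 (bAddLabel e.1 e.2.1 acc)) acc) := by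
  induction xs generalizing acc with
  | nil => simpa [pairsOf] using h
  | cons e rest ih =>
    have h' := bAddLabel_inv e.1 e.2.2 _ (bAddLabel_inv e.1 e.2.1 acc h)
    obtain ⟨hfst, hinv⟩ := ih _ h'
    refine ⟨?_, by simpa using hinv⟩
    simp only [List.foldl_cons, hfst, bAddLabel_fst, pairsOf, List.flatMap_cons]
    simp [List.append_assoc]

theorem bBuild_fst (xs : List (String × Option String × Option String)) :
    (bBuild xs).1 = pairsOf xs := by
  have := bBuild_aux xs ([], PySem.Dict.empty) (by intro k; simp)
  simpa [bBuild] using this.1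

theorem bBuild_get? (xs : List (String × Option String × Option String)) (k : List Char) :
    (bBuild xs).2.get? k = (((pairsOf xs).find? (fun p => p.2 == k)).map Prod.fst) := by
  have := bBuild_aux xs ([], PySem.Dict.empty) (by intro k; simp)
  have h2 := this.2 k
  rw [show ((xs.foldl (fun acc e => bAddLabel e.1 e.2.2 (bAddLabel e.1 e.2.1 acc)) ([], PySem.Dict.empty))) = bBuild xs from rfl] at h2
  rw [h2, bBuild_fst]

theorem aInner_eq (t : List Char) (aid : String) (labels : List (Option String)) (best : Option String × Nat) :
    aInner t aid labels best =
      match (labels.flatMap (labelPair aid)).find? (fun p => p.2 == t) with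
      | some _ => .inl aid
      | none => .inr ((labels.flatMap (labelPair aid)).foldl (aStep t) best) := by
  induction labels generalizing best with
  | nil => simp [aInner]
  | cons label rest ih =>
    cases label with
    | none => simpa [aInner, labelPair] using ih best
    | some lab =>
      simp only [aInner, List.flatMap_cons, labelPair]
      split_ifs with h1 h2 h3 h4 h5
      · simpa using ih best
      · simpa using ih best
      · simp [List.find?, h3]
      · have hne : (alnumFold lab == t) = false := by
          simp; intro e; exact h3 e.symm
        simp only [List.find?_append, List.find?, hne, List.foldl_append, List.foldl_cons,
          List.singleton_append, Option.none_or, List.foldl_nil]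
        rw [show aStep t best (aid, alnumFold lab) = (some aid, min t.length (alnumFold lab).length)
          from by simp only [aStep]; rw [if_pos h4, if_pos h5]]
        exact ih _
      · have hne : (alnumFold lab == t) = false := by
          simp; intro e; exact h3 e.symm
        simp only [List.find?_append, List.find?, hne, List.foldl_append, List.foldl_cons,
          List.singleton_append, Option.none_or, List.foldl_nil]
        rw [show aStep t best (aid, alnumFold lab) = best
          from by simp only [aStep]; rw [if_pos h4, if_neg h5]]
        exact ih best
      · have hne : (alnumFold lab == t) = false := by
          simp; intro e; exact h3 e.symm
        simp only [List.find?_append, List.find?, hne, List.foldl_append, List.foldl_cons,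
          List.singleton_append, Option.none_or, List.foldl_nil]
        rw [show aStep t best (aid, alnumFold lab) = best
          from by simp only [aStep]; rw [if_neg h4]]
        exact ih best

theorem aLoop_eq (t : List Char) (xs : List (String × Option String × Option String)) (best : Option String × Nat) :
    aLoop t xs best =
      match (pairsOf xs).find? (fun p => p.2 == t) with
      | some p => some p.1
      | none => ((pairsOf xs).foldl (aStep t) best).1 := by
  induction xs generalizing best with
  | nil => simp [aLoop, pairsOf]
  | cons e rest ih =>
    obtain ⟨aid, aname, alegal⟩ := e
    simp only [aLoop, aInner_eq]
    have hL : ([aname, alegal].flatMap (labelPair aid)) = labelPair aid aname ++ labelPair aid alegal := by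
      simp
    rw [hL]
    simp only [pairsOf, List.flatMap_cons, List.find?_append, List.foldl_append]
    cases hf : ((labelPair aid aname).find? (fun p => p.2 == t)).or
        ((labelPair aid alegal).find? (fun p => p.2 == t)) with
    | some p =>
      have hp : p.1 = aid := by
        have hm : p ∈ labelPair aid aname ++ labelPair aid alegal := by
          apply List.mem_of_find?_eq_some (p := fun p => p.2 == t)
          rw [List.find?_append]; exact hf
        rcases List.mem_append.mp hm with h | h
        · exact labelPair_fst _ _ _ h
        · exact labelPair_fst _ _ _ h
      simp [hp]
    | none =>
      simp only [Option.none_or]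
      simpa [pairsOf] using ih (List.foldl (aStep t) (List.foldl (aStep t) best (labelPair aid aname)) (labelPair aid alegal))

theorem foldl_aStep_short (t : List Char) (h : t.length < 6) (ps : List (String × List Char)) (best : Option String × Nat) :
    ps.foldl (aStep t) best = best := by
  induction ps generalizing best with
  | nil => rfl
  | cons p rest ih =>
    rw [List.foldl_cons, show aStep t best p = best from by
      simp only [aStep]; rw [if_neg (by intro hc; omega)]]
    exact ih best

theorem aStep_eq_bStep (t : List Char) (h : 6 ≤ t.length) :
    aStep t = fun best (p : String × List Char) =>
      if PySem.Chars.isIn t p.2 ∨ PySem.Chars.isIn p.2 t then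
        if best.2 < min t.length p.2.length then (some p.1, min t.length p.2.length) else best
      else best := by
  funext best p
  simp [aStep, h]

-- ===== VERDICT (by name: the statement is the Claim_ definition above) =====
theorem account_id_for_company_heading_py_spec : Claim_equal_account_id_for_company_heading_py := by
  intro title xs _ _
  show account_id_for_company_heading_py title xs = account_id_for_company_heading_py_alt title xs
  by_cases h1 : (title = "" ∨ xs = [])
  · simp [account_id_for_company_heading_py, account_id_for_company_heading_py_alt, h1]
  · by_cases h4 : (alnumFold title).length < 4
    · simp [account_id_for_company_heading_py, account_id_for_company_heading_py_alt, h1, h4]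
    · simp only [account_id_for_company_heading_py, account_id_for_company_heading_py_alt,
        if_neg h1, if_neg h4]
      rw [aLoop_eq, bBuild_get?, bBuild_fst]
      cases hf : (pairsOf xs).find? (fun p => p.2 == alnumFold title) with
      | some p => simp
      | none =>
        simp only [Option.map_none]
        by_cases h6 : (alnumFold title).length < 6
        · rw [if_pos h6, foldl_aStep_short _ h6]
        · rw [if_neg h6, ← aStep_eq_bStep _ (by omega)]
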